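-- pv_equiv track=rewrite | github.com/JazzPiece/IPD-Auto-Layout | lpd_layout.py | find_safe_columns
-- ===== SOURCE A (Python) =====
-- from collections import defaultdict, deque
--
-- def find_safe_columns(cols, out_edges, activities, total_cols):
--     """
--     A column is 'safe' for band wrapping if no open BRANCH section spans it.
--     For each BRANCH node we find its merge column (first common descendant of
--     all branch targets). Any column strictly between branch_col and merge_col
--     is unsafe.
--     """
--     branch_nodes = [n for n in cols if activities[n].get('activityType') == 'BRANCH']
--
--     unsafe_spans = []   # list of (branch_col, merge_col) half-open intervals [b, m)
--     for bn in branch_nodes: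
--         targets = [dst for dst, t in out_edges.get(bn, []) if t == 'BRANCH']
--         if len(targets) < 2:
--             continue
--
--         # BFS reachable set from each branch target
--         def bfs(start):
--             visited, q = set(), deque([start])
--             while q:
--                 n = q.popleft()
--                 if n in visited:
--                     continue
--                 visited.add(n)
--                 for (dst, _) in out_edges.get(n, []):
--                     q.append(dst)
--             return visited
--
--         reachable = [bfs(t) for t in targets]
--         common = reachable[0]
--         for r in reachable[1:]:
--             common = common & r
--
--         if common:
--             merge_col = min(cols.get(n, 0) for n in common)
--             unsafe_spans.append((cols[bn], merge_col))
--
--     safe = set()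
--     for c in range(total_cols):
--         is_safe = not any(bc <= c < mc for bc, mc in unsafe_spans)
--         if is_safe:
--             safe.add(c)
--     return safe
-- ===== SOURCE B (Python) =====
-- def find_safe_columns(cols, out_edges, activities, total_cols):
--     """Difference-array sweep over clamped unsafe intervals; common descendants
--     found by occurrence counting over saturation-closure reachable sets."""
--     n_slots = total_cols + 1 if total_cols >= 0 else 0
--     diff = [0] * n_slots
--     for bn in cols:
--         if activities[bn].get('activityType') != 'BRANCH':
--             continue
--         targets = [dst for dst, t in out_edges.get(bn, []) if t == 'BRANCH']
--         if len(targets) < 2: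
--             continue
--         hits = {}
--         for t in targets:
--             reach = {t}
--             changed = True
--             while changed:
--                 changed = False
--                 for n in list(reach):
--                     for d, _ in out_edges.get(n, []):
--                         if d not in reach:
--                             reach.add(d)
--                             changed = True
--             for n in reach:
--                 hits[n] = hits.get(n, 0) + 1
--         full = [n for n in hits if hits[n] == len(targets)]
--         if full:
--             mc = min(cols.get(n, 0) for n in full)
--             lo, hi = max(cols[bn], 0), min(mc, total_cols)
--             if lo < hi:
--                 diff[lo] += 1
--                 diff[hi] -= 1
--     safe, cover = set(), 0
--     for c in range(total_cols):
--         cover += diff[c]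
--         if cover == 0:
--             safe.add(c)
--     return safe
-- ===== Notes on version B (the rewrite author's own statement) =====
-- stated objective: faster
-- what changed: B replaces A's per-column rescan of every unsafe span (O(total_cols*S)) by a difference array (+1/-1 at the clamped interval ends, then one prefix-sum sweep over the columns, O(total_cols + S)), and finds each branch's merge column by counting per node from how many branch targets it is reachable (a node is common iff its count equals the number of targets), with reachable sets computed as round-based saturation fixed points instead of A's per-target BFS deque followed by set intersections.
import Mathlib
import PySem

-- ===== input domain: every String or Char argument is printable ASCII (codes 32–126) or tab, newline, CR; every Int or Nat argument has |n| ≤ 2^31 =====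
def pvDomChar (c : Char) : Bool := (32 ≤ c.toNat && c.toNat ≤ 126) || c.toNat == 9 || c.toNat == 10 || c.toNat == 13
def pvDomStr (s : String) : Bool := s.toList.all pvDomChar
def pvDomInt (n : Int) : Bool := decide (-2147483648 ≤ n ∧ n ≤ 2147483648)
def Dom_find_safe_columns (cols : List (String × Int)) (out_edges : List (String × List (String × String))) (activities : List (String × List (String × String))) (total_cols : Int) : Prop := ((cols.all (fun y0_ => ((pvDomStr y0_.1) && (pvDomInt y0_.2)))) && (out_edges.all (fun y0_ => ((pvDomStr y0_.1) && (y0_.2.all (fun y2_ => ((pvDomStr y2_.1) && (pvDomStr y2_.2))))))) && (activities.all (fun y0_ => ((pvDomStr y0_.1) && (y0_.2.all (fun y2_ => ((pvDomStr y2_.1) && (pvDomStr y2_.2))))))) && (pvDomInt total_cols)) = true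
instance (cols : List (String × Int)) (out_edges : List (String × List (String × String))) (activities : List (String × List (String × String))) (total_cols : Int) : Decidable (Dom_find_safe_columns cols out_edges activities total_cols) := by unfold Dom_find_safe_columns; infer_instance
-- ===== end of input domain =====

-- B finds the unsafe columns with a difference-array sweep over the clamped unsafe intervals
-- instead of A's rescan of all spans at every column, and finds the common descendants by
-- occurrence counting over reachable sets computed as saturation closures (round-based fixed
-- point) instead of A's per-target BFS followed by set intersection.
-- (Equivalence is about the return value; neither version mutates its arguments.)

-- ===== PORT A =====

-- out_edges.get(n, [])  (shared lookup helper of both ports)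
def pvAdj (oe : List (String × List (String × String))) (n : String) : List (String × String) :=
  (PySem.Dict.mk oe).getD n []

-- node universe used only as a termination measure for the worklist/saturation loops
def pvUdom (oe : List (String × List (String × String))) (start : String) : List String :=
  start :: oe.flatMap (fun p => p.2.map (·.1))

-- a successful Dict.mk lookup returns one of the stored values (cited by pvAdj_mem_pvUdom)
theorem pvGetMk_mem {ν : Type} (l : List (String × ν)) (n : String) (v : ν)
    (h : (PySem.Dict.mk l).get? n = some v) : ∃ q ∈ l, q.2 = v := by
  induction l with
  | nil => simp [PySem.Dict.get?] at h
  | cons a t ih =>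
    obtain ⟨k, w⟩ := a
    rw [PySem.Dict.get?_mk_cons] at h
    split at h
    · exact ⟨(k, w), by simp, by simpa using h⟩
    · obtain ⟨q, hq, hv⟩ := ih h
      exact ⟨q, List.mem_cons_of_mem _ hq, hv⟩

-- every edge destination lies in the universe (cited by the loops' hypothesis argument)
theorem pvAdj_mem_pvUdom (oe : List (String × List (String × String))) (start n : String) :
    ∀ p ∈ pvAdj oe n, p.1 ∈ pvUdom oe start := by
  intro p hp
  unfold pvAdj at hp
  rw [PySem.Dict.getD_eq_get?_getD] at hp
  cases h : (PySem.Dict.mk oe).get? n with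
  | none => rw [h] at hp; simp at hp
  | some v =>
    rw [h] at hp; simp at hp
    obtain ⟨q, hq, rfl⟩ := pvGetMk_mem oe n v h
    exact List.mem_cons_of_mem _ (List.mem_flatMap.2 ⟨q, hq, List.mem_map.2 ⟨p, hp, rfl⟩⟩)

-- growing the visited set by a fresh universe node shrinks the unvisited part (termination)
theorem pvFilter_lt (U S S' : List String) (hsub : ∀ x ∈ S, x ∈ S') (d : String)
    (hdU : d ∈ U) (hdS' : d ∈ S') (hdS : d ∉ S) :
    (U.filter (fun u => !(PySem.Set.contains S' u))).length
      < (U.filter (fun u => !(PySem.Set.contains S u))).length := by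
  have e1 : U.filter (fun u => !(PySem.Set.contains S' u))
      = (U.filter (fun u => !(PySem.Set.contains S u))).filter (fun u => !(PySem.Set.contains S' u)) := by
    rw [List.filter_filter]
    apply List.filter_congr
    intro u _
    simp only [PySem.Set.contains_eq_listContains]
    cases h : decide (u ∈ S') with
    | true => simp_all
    | false =>
      have : u ∉ S' := by simpa using h
      have : u ∉ S := fun hu => this (hsub u hu)
      simp_all
  rw [e1]
  apply List.length_filter_lt_length_iff_exists.2
  refine ⟨d, ?_, by simpa [PySem.Set.contains_eq_listContains] using hdS'⟩
  simp [List.mem_filter, hdU, PySem.Set.contains_eq_listContains]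
  exact hdS

-- A's bfs worklist: pop the FRONT of the deque, skip if visited, else visit and append successors
def pvBfsLoop (oe : List (String × List (String × String))) (U : List String)
    (hU : ∀ n : String, ∀ p ∈ pvAdj oe n, p.1 ∈ U)
    (visited : PySem.Set String) (q : List String) (hq : ∀ x ∈ q, x ∈ U) : PySem.Set String :=
  match q with
  | [] => visited
  | n :: rest =>
    if hv : n ∈ visited then
      pvBfsLoop oe U hU visited rest (fun x hx => hq x (List.mem_cons_of_mem _ hx))
    else
      pvBfsLoop oe U hU (PySem.Set.add visited n) (rest ++ (pvAdj oe n).map (·.1))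
        (fun x hx => by
          rcases List.mem_append.1 hx with h | h
          · exact hq x (List.mem_cons_of_mem _ h)
          · obtain ⟨p, hp, rfl⟩ := List.mem_map.1 h
            exact hU n p hp)
termination_by ((U.filter (fun u => !(PySem.Set.contains visited u))).length, q.length)
decreasing_by
  · exact Prod.Lex.right _ (by simp)
  · exact Prod.Lex.left _ _ (pvFilter_lt U visited (PySem.Set.add visited n)
      (fun x hx => (PySem.Set.mem_add _ _ _).2 (Or.inl hx)) n (hq n List.mem_cons_self)
      ((PySem.Set.mem_add _ _ _).2 (Or.inr rfl)) hv)

-- bfs(start)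
def pvBfsRun (oe : List (String × List (String × String))) (start : String) : PySem.Set String :=
  pvBfsLoop oe (pvUdom oe start) (fun n => pvAdj_mem_pvUdom oe start n) [] [start]
    (fun x hx => by simpa [pvUdom] using Or.inl (List.mem_singleton.1 hx))

-- unsafe_spans loop of A (BFS per branch target, intersection of the materialised list of sets)
def pvSpansA (cols : List (String × Int)) (oe : List (String × List (String × String))) (acts : List (String × List (String × String))) : List (Int × Int) :=
  ((cols.map (·.1)).filter
      (fun n => (PySem.Dict.mk ((PySem.Dict.mk acts).getD n [])).get? "activityType" == some "BRANCH")).foldl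
    (fun (spans : List (Int × Int)) bn =>
      let targets := (((PySem.Dict.mk oe).getD bn []).filter (fun p => p.2 == "BRANCH")).map (·.1)
      if targets.length < 2 then spans
      else
        let reachable := targets.map (fun t => pvBfsRun oe t)
        match reachable with
        | [] => spans
        | r0 :: rs =>
          let common := rs.foldl (fun c r => PySem.Set.inter c r) r0
          -- `if common:` fused with `min(...)`: min? is none exactly on the empty set
          match PySem.List.min? (common.map (fun n => (PySem.Dict.mk cols).getD n 0)) (fun x => x) with
          | none => spans
          | some m => spans ++ [((PySem.Dict.mk cols).getD bn 0, m)]) []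

def find_safe_columns (cols : List (String × Int)) (out_edges : List (String × List (String × String))) (activities : List (String × List (String × String))) (total_cols : Int) : List Int :=
  (PySem.List.pyRange 0 total_cols 1).foldl (fun safe c =>
      if !((pvSpansA cols out_edges activities).any (fun bm => decide (bm.1 ≤ c ∧ c < bm.2))) then PySem.Set.add safe c
      else safe) ([] : PySem.Set Int)

-- ===== PORT B =====

-- one inner step of B's saturation round: `if d not in reach: reach.add(d); changed = True`
def pvSatStep (st : PySem.Set String × Bool) (d : String) : PySem.Set String × Bool :=
  if d ∈ st.1 then st else (PySem.Set.add st.1 d, true)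

-- one round of B's fixed-point loop: `for n in list(reach): for d, _ in adj(n): …`
def pvSatRound (oe : List (String × List (String × String))) (S : PySem.Set String) :
    PySem.Set String × Bool :=
  S.foldl (fun st n => (pvAdj oe n).foldl (fun st p => pvSatStep st p.1) st) (S, false)

-- all successors of the nodes of S (proof-side view of one round's scanned destinations)
def pvSuccs (oe : List (String × List (String × String))) (S : List String) : List String :=
  S.flatMap (fun n => (pvAdj oe n).map (·.1))

-- the flattened-step characterisation of a round (cited by pvSat's termination and body)
theorem pvStepFold (L : List String) (T : PySem.Set String) (b : Bool) :
    ((L.foldl pvSatStep (T, b)).2 = (b || L.any (fun d => !(PySem.Set.contains T d))))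
    ∧ (∀ x, x ∈ (L.foldl pvSatStep (T, b)).1 ↔ x ∈ T ∨ x ∈ L) := by
  induction L generalizing T b with
  | nil => simp
  | cons d L' ih =>
    rw [List.foldl_cons]
    by_cases hd : d ∈ T
    · rw [pvSatStep, if_pos hd]
      obtain ⟨h2, h1⟩ := ih T b
      refine ⟨?_, fun x => ?_⟩
      · simp only [h2, List.any_cons]
        simp [hd]
      · rw [h1 x]
        constructor
        · rintro (h | h)
          · exact Or.inl h
          · exact Or.inr (List.mem_cons_of_mem _ h)
        · rintro (h | h)
          · exact Or.inl h
          · rcases List.mem_cons.1 h with rfl | h'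
            · exact Or.inl hd
            · exact Or.inr h'
    · rw [pvSatStep, if_neg hd]
      obtain ⟨h2, h1⟩ := ih (PySem.Set.add T d) true
      refine ⟨?_, fun x => ?_⟩
      · simp only [h2, List.any_cons, Bool.true_or]
        symm
        simp only [Bool.or_eq_true, List.any_eq_true]
        exact Or.inr (Or.inl (by simpa using hd))
      · rw [h1 x]
        simp only [PySem.Set.mem_add]
        constructor
        · rintro ((h | rfl) | h)
          · exact Or.inl h
          · exact Or.inr List.mem_cons_self
          · exact Or.inr (List.mem_cons_of_mem _ h)
        · rintro (h | h)
          · exact Or.inl (Or.inl h)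
          · rcases List.mem_cons.1 h with rfl | h'
            · exact Or.inl (Or.inr rfl)
            · exact Or.inr h'

theorem pvSatRound_eq (oe : List (String × List (String × String))) (S : PySem.Set String) :
    pvSatRound oe S = (pvSuccs oe S).foldl pvSatStep (S, false) := by
  unfold pvSatRound pvSuccs
  rw [List.foldl_flatMap]
  apply PySem.List.foldl_congr_mem
  intro acc n _
  rw [List.foldl_map]

theorem pvSatRound_snd (oe : List (String × List (String × String))) (S : PySem.Set String) :
    (pvSatRound oe S).2 = (pvSuccs oe S).any (fun d => !(PySem.Set.contains S d)) := by
  rw [pvSatRound_eq]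
  exact (pvStepFold _ S false).1

theorem pvSatRound_mem (oe : List (String × List (String × String))) (S : PySem.Set String)
    (x : String) : x ∈ (pvSatRound oe S).1 ↔ x ∈ S ∨ x ∈ pvSuccs oe S := by
  rw [pvSatRound_eq]
  exact (pvStepFold _ S false).2 x

theorem pvSuccs_mem_U (oe : List (String × List (String × String))) (U : List String)
    (hU : ∀ n : String, ∀ p ∈ pvAdj oe n, p.1 ∈ U) (S : List String) :
    ∀ x ∈ pvSuccs oe S, x ∈ U := by
  intro x hx
  obtain ⟨n, _, hx'⟩ := List.mem_flatMap.1 hx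
  obtain ⟨p, hp, rfl⟩ := List.mem_map.1 hx'
  exact hU n p hp

-- B's `while changed:` saturation loop: re-run rounds until one adds nothing
def pvSat (oe : List (String × List (String × String))) (U : List String)
    (hU : ∀ n : String, ∀ p ∈ pvAdj oe n, p.1 ∈ U)
    (S : PySem.Set String) (hS : ∀ x ∈ S, x ∈ U) : PySem.Set String :=
  if h : (pvSatRound oe S).2 = true then
    pvSat oe U hU (pvSatRound oe S).1
      (fun x hx => by
        rcases (pvSatRound_mem oe S x).1 hx with h' | h'
        · exact hS x h'
        · exact pvSuccs_mem_U oe U hU S x h')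
  else (pvSatRound oe S).1
termination_by (U.filter (fun u => !(PySem.Set.contains S u))).length
decreasing_by
  have hx : ∃ d ∈ pvSuccs oe S, d ∉ S := by
    rw [pvSatRound_snd] at h
    obtain ⟨d, hd, hd'⟩ := List.any_eq_true.1 h
    exact ⟨d, hd, by simpa [PySem.Set.contains_eq_listContains] using hd'⟩
  obtain ⟨d, hd, hdS⟩ := hx
  exact pvFilter_lt U S (pvSatRound oe S).1
    (fun x hx => (pvSatRound_mem oe S x).2 (Or.inl hx)) d
    (pvSuccs_mem_U oe U hU S d hd) ((pvSatRound_mem oe S d).2 (Or.inr hd)) hdS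

-- `reach = {t}; while changed: …`
def pvSatRun (oe : List (String × List (String × String))) (start : String) : PySem.Set String :=
  pvSat oe (pvUdom oe start) (fun n => pvAdj_mem_pvUdom oe start n) [start]
    (fun x hx => by simpa [pvUdom] using Or.inl (List.mem_singleton.1 hx))

-- `lo, hi = max(bc, 0), min(mc, total_cols); if lo < hi: diff[lo] += 1; diff[hi] -= 1`
-- (getD is exact here: whenever lo < hi the indices lie inside the array of length total_cols+1)
def pvApplySpan (tc : Int) (d : List Int) (bm : Int × Int) : List Int :=
  let lo := max bm.1 0
  let hi := min bm.2 tc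
  if lo < hi then
    let d1 := d.set lo.toNat (d.getD lo.toNat 0 + 1)
    d1.set hi.toNat (d1.getD hi.toNat 0 - 1)
  else d

def find_safe_columns_alt (cols : List (String × Int)) (out_edges : List (String × List (String × String))) (activities : List (String × List (String × String))) (total_cols : Int) : List Int :=
  let nslots := if total_cols ≥ 0 then (total_cols + 1).toNat else 0
  let diff := cols.foldl (fun (d : List Int) bnp =>
      if (PySem.Dict.mk ((PySem.Dict.mk activities).getD bnp.1 [])).get? "activityType" ≠ some "BRANCH" then d
      else
        let targets := (((PySem.Dict.mk out_edges).getD bnp.1 []).filter (fun p => p.2 == "BRANCH")).map (·.1)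
        if targets.length < 2 then d
        else
          let hits := targets.foldl (fun (h : PySem.Dict String Int) t =>
              (pvSatRun out_edges t).foldl (fun h n => h.insert n (h.getD n 0 + 1)) h) PySem.Dict.empty
          let full := (hits.items.filter (fun p => p.2 == (targets.length : Int))).map (·.1)
          -- `if full:` fused with `min(...)`: min? is none exactly on the empty list
          match PySem.List.min? (full.map (fun n => (PySem.Dict.mk cols).getD n 0)) (fun x => x) with
          | none => d
          | some m => pvApplySpan total_cols d ((PySem.Dict.mk cols).getD bnp.1 0, m))
    (List.replicate nslots 0)
  -- `cover += diff[c]` (getD exact: 0 ≤ c < total_cols < len(diff)); `if cover == 0: safe.add(c)`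
  ((PySem.List.pyRange 0 total_cols 1).foldl (fun (st : PySem.Set Int × Int) c =>
      let cover := st.2 + diff.getD c.toNat 0
      (if cover == 0 then PySem.Set.add st.1 c else st.1, cover)) (([] : PySem.Set Int), 0)).1

-- ===== PRECONDITION & SPEC =====
-- Pre_ excludes exactly the inputs where Python A raises KeyError: a node listed in cols
-- whose key is missing from activities (activities[n]).
def Pre_find_safe_columns (cols : List (String × Int)) (out_edges : List (String × List (String × String))) (activities : List (String × List (String × String))) (total_cols : Int) : Prop :=
  ∀ p ∈ cols, p.1 ∈ activities.map (·.1)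
instance (cols : List (String × Int)) (out_edges : List (String × List (String × String))) (activities : List (String × List (String × String))) (total_cols : Int) : Decidable (Pre_find_safe_columns cols out_edges activities total_cols) := by unfold Pre_find_safe_columns; infer_instance

def pvWitness_find_safe_columns : (List (String × Int)) × (List (String × List (String × String))) × (List (String × List (String × String))) × Int :=
  ([("a", 0), ("b", 1)], [("a", [("b", "BRANCH")])], [("a", [("activityType", "BRANCH")]), ("b", [("activityType", "TASK")])], 3)

def Spec_find_safe_columns (cols : List (String × Int)) (out_edges : List (String × List (String × String))) (activities : List (String × List (String × String))) (total_cols : Int) (out : List Int) : Prop := out = find_safe_columns_alt cols out_edges activities total_cols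
instance (cols : List (String × Int)) (out_edges : List (String × List (String × String))) (activities : List (String × List (String × String))) (total_cols : Int) (out : List Int) : Decidable (Spec_find_safe_columns cols out_edges activities total_cols out) := by unfold Spec_find_safe_columns; infer_instance

-- ===== CLAIM (what is proved, stated in full; the proofs are below) =====
def Claim_equal_find_safe_columns : Prop := ∀ (cols : List (String × Int)) (out_edges : List (String × List (String × String))) (activities : List (String × List (String × String))) (total_cols : Int), Dom_find_safe_columns cols out_edges activities total_cols → Pre_find_safe_columns cols out_edges activities total_cols → Spec_find_safe_columns cols out_edges activities total_cols (find_safe_columns cols out_edges activities total_cols)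

-- ===== LEMMAS AND PROOFS =====

-- one edge step in the graph, and reachability
def pvStep (oe : List (String × List (String × String))) (a b : String) : Prop :=
  ∃ p ∈ pvAdj oe a, p.1 = b
def pvReach (oe : List (String × List (String × String))) : String → String → Prop :=
  Relation.ReflTransGen (pvStep oe)

-- a path leaving the visited set must pass through the pending worklist
theorem pvEscape (oe : List (String × List (String × String))) (visited q : List String)
    (hc : ∀ v ∈ visited, ∀ p ∈ pvAdj oe v, p.1 ∈ visited ∨ p.1 ∈ q)
    {v x : String} (hv : v ∈ visited) (hr : pvReach oe v x) :
    x ∈ visited ∨ ∃ s ∈ q, pvReach oe s x := by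
  induction hr with
  | refl => exact Or.inl hv
  | tail hr hstep ih =>
    rename_i y z
    rcases ih with hy | ⟨s, hs, hsy⟩
    · obtain ⟨p, hp, rfl⟩ := hstep
      rcases hc y hy p hp with h | h
      · exact Or.inl h
      · exact Or.inr ⟨p.1, h, Relation.ReflTransGen.refl⟩
    · exact Or.inr ⟨s, hs, hsy.tail hstep⟩

theorem pvBfsLoop_mem (oe : List (String × List (String × String))) (U : List String)
    (hU : ∀ n : String, ∀ p ∈ pvAdj oe n, p.1 ∈ U)
    (visited : PySem.Set String) (q : List String) (hq : ∀ x ∈ q, x ∈ U) (x : String) :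
    ∀ _hc : ∀ v ∈ visited, ∀ p ∈ pvAdj oe v, p.1 ∈ visited ∨ p.1 ∈ q,
    (x ∈ pvBfsLoop oe U hU visited q hq ↔ x ∈ visited ∨ ∃ s ∈ q, pvReach oe s x) := by
  induction visited, q, hq using pvBfsLoop.induct oe U hU with
  | case1 visited hq _h =>
    intro _hc
    rw [pvBfsLoop]
    simp
  | case2 visited n rest hq hv _h ih =>
    intro hc
    have hc' : ∀ v ∈ visited, ∀ p ∈ pvAdj oe v, p.1 ∈ visited ∨ p.1 ∈ rest := by
      intro v hv' p hp
      rcases hc v hv' p hp with h | h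
      · exact Or.inl h
      · rcases List.mem_cons.1 h with h1 | h1
        · exact Or.inl (h1 ▸ hv)
        · exact Or.inr h1
    rw [pvBfsLoop]
    simp only [dif_pos hv]
    rw [ih hc']
    constructor
    · rintro (h | ⟨s, hs, hr⟩)
      · exact Or.inl h
      · exact Or.inr ⟨s, List.mem_cons_of_mem _ hs, hr⟩
    · rintro (h | ⟨s, hs, hr⟩)
      · exact Or.inl h
      · rcases List.mem_cons.1 hs with rfl | h1
        · exact pvEscape oe visited rest hc' hv hr
        · exact Or.inr ⟨s, h1, hr⟩
  | case3 visited n rest hq hv _h ih =>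
    intro hc
    have hc' : ∀ v ∈ PySem.Set.add visited n, ∀ p ∈ pvAdj oe v,
        p.1 ∈ PySem.Set.add visited n ∨ p.1 ∈ rest ++ (pvAdj oe n).map (·.1) := by
      intro v hv' p hp
      rcases (PySem.Set.mem_add _ _ _).1 hv' with h | rfl
      · rcases hc v h p hp with h1 | h1
        · exact Or.inl ((PySem.Set.mem_add _ _ _).2 (Or.inl h1))
        · rcases List.mem_cons.1 h1 with h2 | h2
          · exact Or.inl ((PySem.Set.mem_add _ _ _).2 (Or.inr h2))
          · exact Or.inr (List.mem_append.2 (Or.inl h2))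
      · exact Or.inr (List.mem_append.2 (Or.inr (List.mem_map.2 ⟨p, hp, rfl⟩)))
    rw [pvBfsLoop]
    simp only [dif_neg hv]
    rw [ih hc']
    constructor
    · rintro (h | ⟨s, hs, hr⟩)
      · rcases (PySem.Set.mem_add _ _ _).1 h with h1 | rfl
        · exact Or.inl h1
        · exact Or.inr ⟨x, List.mem_cons_self, Relation.ReflTransGen.refl⟩
      · rcases List.mem_append.1 hs with h1 | h1
        · exact Or.inr ⟨s, List.mem_cons_of_mem _ h1, hr⟩
        · obtain ⟨p, hp, rfl⟩ := List.mem_map.1 h1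
          exact Or.inr ⟨n, List.mem_cons_self, Relation.ReflTransGen.head ⟨p, hp, rfl⟩ hr⟩
    · rintro (h | ⟨s, hs, hr⟩)
      · exact Or.inl ((PySem.Set.mem_add _ _ _).2 (Or.inl h))
      · rcases List.mem_cons.1 hs with rfl | h1
        · rcases (Relation.ReflTransGen.cases_head hr) with rfl | ⟨y, hstep, hyx⟩
          · exact Or.inl ((PySem.Set.mem_add _ _ _).2 (Or.inr rfl))
          · obtain ⟨p, hp, rfl⟩ := hstep
            exact Or.inr ⟨p.1, List.mem_append.2 (Or.inr (List.mem_map.2 ⟨p, hp, rfl⟩)), hyx⟩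
        · exact Or.inr ⟨s, List.mem_append.2 (Or.inl h1), hr⟩

theorem pvBfsRun_mem (oe : List (String × List (String × String))) (t x : String) :
    x ∈ pvBfsRun oe t ↔ pvReach oe t x := by
  unfold pvBfsRun
  rw [pvBfsLoop_mem oe _ _ [] [t] _ x (by simp)]
  simp

-- a successor-closed set contains everything reachable from it
theorem pvClosed (oe : List (String × List (String × String))) (S : List String)
    (hcl : ∀ n ∈ S, ∀ p ∈ pvAdj oe n, p.1 ∈ S) {s x : String}
    (hs : s ∈ S) (hr : pvReach oe s x) : x ∈ S := by
  induction hr with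
  | refl => exact hs
  | tail _ hstep ih =>
    obtain ⟨p, hp, rfl⟩ := hstep
    exact hcl _ ih p hp

theorem pvSat_mem (oe : List (String × List (String × String))) (U : List String)
    (hU : ∀ n : String, ∀ p ∈ pvAdj oe n, p.1 ∈ U)
    (S : PySem.Set String) (hS : ∀ x ∈ S, x ∈ U) (x : String) :
    x ∈ pvSat oe U hU S hS ↔ ∃ s ∈ S, pvReach oe s x := by
  induction S, hS using pvSat.induct oe U hU with
  | case1 S hS h ih =>
    rw [pvSat, dif_pos h, ih]
    constructor
    · rintro ⟨s, hs, hr⟩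
      rcases (pvSatRound_mem oe S s).1 hs with h' | h'
      · exact ⟨s, h', hr⟩
      · obtain ⟨n, hn, hs'⟩ := List.mem_flatMap.1 h'
        obtain ⟨p, hp, rfl⟩ := List.mem_map.1 hs'
        exact ⟨n, hn, Relation.ReflTransGen.head ⟨p, hp, rfl⟩ hr⟩
    · rintro ⟨s, hs, hr⟩
      exact ⟨s, (pvSatRound_mem oe S s).2 (Or.inl hs), hr⟩
  | case2 S hS h =>
    rw [pvSat, dif_neg h]
    have hsub : ∀ d ∈ pvSuccs oe S, d ∈ S := by
      intro d hd
      by_contra hdS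
      apply h
      rw [pvSatRound_snd]
      exact List.any_eq_true.2 ⟨d, hd, by simpa [PySem.Set.contains_eq_listContains] using hdS⟩
    have hmem : ∀ y, y ∈ (pvSatRound oe S).1 ↔ y ∈ S := by
      intro y
      rw [pvSatRound_mem]
      exact ⟨fun h' => h'.elim id (hsub y), Or.inl⟩
    rw [hmem x]
    constructor
    · intro hx
      exact ⟨x, hx, Relation.ReflTransGen.refl⟩
    · rintro ⟨s, hs, hr⟩
      exact pvClosed oe S
        (fun n hn p hp => hsub p.1 (List.mem_flatMap.2 ⟨n, hn, List.mem_map.2 ⟨p, hp, rfl⟩⟩))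
        hs hr

theorem pvSatRun_mem (oe : List (String × List (String × String))) (t x : String) :
    x ∈ pvSatRun oe t ↔ pvReach oe t x := by
  unfold pvSatRun
  rw [pvSat_mem]
  simp

-- the saturation set stays duplicate-free
theorem pvStepFold_nodup (L : List String) (T : PySem.Set String) (b : Bool)
    (hT : T.Nodup) : ((L.foldl pvSatStep (T, b)).1).Nodup := by
  induction L generalizing T b with
  | nil => simpa
  | cons d L' ih =>
    rw [List.foldl_cons]
    by_cases hd : d ∈ T
    · rw [pvSatStep, if_pos hd]; exact ih T b hT
    · rw [pvSatStep, if_neg hd]; exact ih _ true (PySem.Set.nodup_add _ _ hT)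

theorem pvSatRound_nodup (oe : List (String × List (String × String))) (S : PySem.Set String)
    (hS : S.Nodup) : ((pvSatRound oe S).1).Nodup := by
  rw [pvSatRound_eq]
  exact pvStepFold_nodup _ S false hS

theorem pvSat_nodup (oe : List (String × List (String × String))) (U : List String)
    (hU : ∀ n : String, ∀ p ∈ pvAdj oe n, p.1 ∈ U)
    (S : PySem.Set String) (hS : ∀ x ∈ S, x ∈ U) (hnd : S.Nodup) :
    (pvSat oe U hU S hS).Nodup := by
  induction S, hS using pvSat.induct oe U hU with
  | case1 S hS h ih => rw [pvSat, dif_pos h]; exact ih (pvSatRound_nodup oe S hnd)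
  | case2 S hS h => rw [pvSat, dif_neg h]; exact pvSatRound_nodup oe S hnd

theorem pvSatRun_nodup (oe : List (String × List (String × String))) (t : String) :
    (pvSatRun oe t).Nodup := pvSat_nodup _ _ _ _ _ (by simp)

-- counting occurrences across a flatMap of duplicate-free blocks
theorem pvCount_flatMap_nodup {α β : Type} [DecidableEq α] (l : List β) (g : β → List α)
    (hg : ∀ t ∈ l, (g t).Nodup) (x : α) :
    (l.flatMap g).count x = l.countP (fun t => decide (x ∈ g t)) := by
  induction l with
  | nil => simp
  | cons a t ih =>
    rw [List.flatMap_cons, List.count_append, List.countP_cons,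
      ih (fun b hb => hg b (List.mem_cons_of_mem _ hb))]
    by_cases hm : x ∈ g a
    · rw [List.count_eq_one_of_mem (hg a List.mem_cons_self) hm]
      simp [hm, Nat.add_comm]
    · rw [List.count_eq_zero_of_not_mem hm]
      simp [hm]

-- membership in B's `full` list is "reachable from every branch target"
theorem pvFull_mem (oe : List (String × List (String × String))) (targets : List String)
    (hne : targets ≠ []) (x : String) :
    (x ∈ ((targets.foldl (fun (h : PySem.Dict String Int) t =>
          (pvSatRun oe t).foldl (fun h n => h.insert n (h.getD n 0 + 1)) h)
        PySem.Dict.empty).items.filter (fun p => p.2 == (targets.length : Int))).map (·.1)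
      ↔ ∀ t ∈ targets, x ∈ pvSatRun oe t) := by
  set flat := targets.flatMap (fun t => pvSatRun oe t) with hflatdef
  have hflat : targets.foldl (fun (h : PySem.Dict String Int) t =>
      (pvSatRun oe t).foldl (fun h n => h.insert n (h.getD n 0 + 1)) h) PySem.Dict.empty
      = flat.foldl (fun h n => h.insert n (h.getD n 0 + 1)) PySem.Dict.empty := by
    rw [hflatdef, List.foldl_flatMap]
  rw [hflat]
  set hits := flat.foldl (fun (h : PySem.Dict String Int) n => h.insert n (h.getD n 0 + 1))
    PySem.Dict.empty with hhits
  have hnd : hits.keys.Nodup := by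
    rw [hhits]
    exact PySem.Dict.nodup_keys_foldl_insert flat (fun h n => h.getD n 0 + 1) _ (by simp)
  have hkeys : ∀ y, y ∈ hits.keys ↔ y ∈ flat := by
    intro y
    rw [hhits, PySem.Dict.keys_foldl_insert]
    simp [PySem.Dict.keys, PySem.Dict.empty, PySem.Set.mem_update]
  have hgetD : hits.getD x 0 = (flat.count x : Int) := by
    rw [hhits, PySem.Dict.getD_foldl_insert_add_one]
    simp [PySem.Dict.getD_empty]
  have hcount : flat.count x = targets.countP (fun t => decide (x ∈ pvSatRun oe t)) :=
    pvCount_flatMap_nodup targets _ (fun t _ => pvSatRun_nodup oe t) x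
  constructor
  · intro hx
    obtain ⟨p, hp, rfl⟩ := List.mem_map.1 hx
    obtain ⟨hpi, hpv⟩ := List.mem_filter.1 hp
    obtain ⟨k, v⟩ := p
    have hget : hits.get? k = some v := PySem.Dict.get?_of_mem_items hits hpi hnd
    have hv : v = (targets.length : Int) := by simpa using hpv
    have hgd : hits.getD k 0 = v := by
      rw [PySem.Dict.getD_eq_get?_getD, hget]; rfl
    have : flat.count k = targets.length := by
      have := hgetD
      rw [hgd, hv] at this
      exact_mod_cast this.symm
    rw [hcount] at this
    intro t ht
    rw [List.countP_eq_length_filter] at this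
    have := (List.length_filter_eq_length_iff).1 this
    simpa using this t ht
  · intro hall
    have hxflat : x ∈ flat := by
      rcases List.exists_mem_of_ne_nil targets hne with ⟨t0, ht0⟩
      exact List.mem_flatMap.2 ⟨t0, ht0, hall t0 ht0⟩
    have hcnt : flat.count x = targets.length := by
      rw [hcount, List.countP_eq_length_filter]
      exact (List.length_filter_eq_length_iff).2 (fun t ht => by simpa using hall t ht)
    have hget : hits.get? x = some ((targets.length : Nat) : Int) := by
      have hxk : x ∈ hits.keys := (hkeys x).2 hxflat
      cases hg : hits.get? x with
      | none => exact absurd ((PySem.Dict.get?_eq_none_iff_not_mem_keys hits x).1 hg) (by simpa using hxk)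
      | some v =>
        have : hits.getD x 0 = v := by rw [PySem.Dict.getD_eq_get?_getD, hg]; rfl
        rw [hgetD, hcnt] at this
        rw [← this]
    refine List.mem_map.2 ⟨(x, (targets.length : Int)), ?_, rfl⟩
    exact List.mem_filter.2 ⟨PySem.Dict.mem_items_of_get?_eq_some _ hget, by simp⟩

-- min over the image of two membership-equal node sets is the same
theorem pvMin_eq_of_mem_iff (L1 L2 : List String) (f : String → Int)
    (h : ∀ x, x ∈ L1 ↔ x ∈ L2) :
    PySem.List.min? (L1.map f) (fun x => x) = PySem.List.min? (L2.map f) (fun x => x) := by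
  have hmap : ∀ y, y ∈ L1.map f ↔ y ∈ L2.map f := by
    intro y
    simp only [List.mem_map]
    constructor
    · rintro ⟨a, ha, rfl⟩; exact ⟨a, (h a).1 ha, rfl⟩
    · rintro ⟨a, ha, rfl⟩; exact ⟨a, (h a).2 ha, rfl⟩
  cases h1 : PySem.List.min? (L1.map f) (fun x => x) with
  | none =>
    rw [PySem.List.min?_eq_none_iff] at h1
    have : L2.map f = [] := by
      exact List.eq_nil_iff_forall_not_mem.2 (fun y hy => by
        rw [h1] at hmap; simpa using (hmap y).2 hy)
    rw [(PySem.List.min?_eq_none_iff _ _).2 this]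
  | some m1 =>
    have hm1 : m1 ∈ L2.map f := (hmap m1).1 (PySem.List.min?_mem h1)
    cases h2 : PySem.List.min? (L2.map f) (fun x => x) with
    | none =>
      rw [PySem.List.min?_eq_none_iff] at h2
      rw [h2] at hm1; simp at hm1
    | some m2 =>
      have hle1 : m2 ≤ m1 := PySem.List.min?_isMin h2 m1 hm1
      have hle2 : m1 ≤ m2 := PySem.List.min?_isMin h1 m2 ((hmap m2).2 (PySem.List.min?_mem h2))
      rw [le_antisymm hle1 hle2]

-- intersection fold of A characterised
theorem pvInterFold_mem {α : Type} [BEq α] [LawfulBEq α] (f : String → PySem.Set α)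
    (ts : List String) (s : PySem.Set α) (x : α) :
    x ∈ ts.foldl (fun c t => PySem.Set.inter c (f t)) s ↔ x ∈ s ∧ ∀ t ∈ ts, x ∈ f t := by
  induction ts generalizing s with
  | nil => simp
  | cons t0 ts ih =>
    rw [List.foldl_cons, ih]
    rw [PySem.Set.mem_inter]
    constructor
    · rintro ⟨⟨h1, h2⟩, h3⟩
      exact ⟨h1, fun t ht => by rcases List.mem_cons.1 ht with rfl | ht1; exacts [h2, h3 t ht1]⟩
    · rintro ⟨h1, h2⟩
      exact ⟨⟨h1, h2 t0 List.mem_cons_self⟩, fun t ht => h2 t (List.mem_cons_of_mem _ ht)⟩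

-- the optional span a branch node contributes, in A's shape and in B's shape
def pvSpanOptA (cols : List (String × Int)) (oe : List (String × List (String × String)))
    (bn : String) : List (Int × Int) :=
  let targets := (((PySem.Dict.mk oe).getD bn []).filter (fun p => p.2 == "BRANCH")).map (·.1)
  if targets.length < 2 then []
  else
    let reachable := targets.map (fun t => pvBfsRun oe t)
    match reachable with
    | [] => []
    | r0 :: rs =>
      let common := rs.foldl (fun c r => PySem.Set.inter c r) r0
      match PySem.List.min? (common.map (fun n => (PySem.Dict.mk cols).getD n 0)) (fun x => x) with
      | none => []
      | some m => [((PySem.Dict.mk cols).getD bn 0, m)]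

def pvSpanOptB (cols : List (String × Int)) (oe : List (String × List (String × String)))
    (bn : String) : List (Int × Int) :=
  let targets := (((PySem.Dict.mk oe).getD bn []).filter (fun p => p.2 == "BRANCH")).map (·.1)
  if targets.length < 2 then []
  else
    let hits := targets.foldl (fun (h : PySem.Dict String Int) t =>
        (pvSatRun oe t).foldl (fun h n => h.insert n (h.getD n 0 + 1)) h) PySem.Dict.empty
    let full := (hits.items.filter (fun p => p.2 == (targets.length : Int))).map (·.1)
    match PySem.List.min? (full.map (fun n => (PySem.Dict.mk cols).getD n 0)) (fun x => x) with
    | none => []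
    | some m => [((PySem.Dict.mk cols).getD bn 0, m)]

theorem pvSpanOpt_eq (cols : List (String × Int)) (oe : List (String × List (String × String)))
    (bn : String) : pvSpanOptA cols oe bn = pvSpanOptB cols oe bn := by
  unfold pvSpanOptA pvSpanOptB
  set targets := (((PySem.Dict.mk oe).getD bn []).filter (fun p => p.2 == "BRANCH")).map (·.1)
    with htg
  by_cases hlen : targets.length < 2
  · simp [hlen]
  · cases hts : targets with
    | nil => rw [hts] at hlen; simp at hlen
    | cons t0 ts =>
      simp only [List.map_cons]
      have h1 : ∀ x, x ∈ (ts.map (fun t => pvBfsRun oe t)).foldl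
            (fun c r => PySem.Set.inter c r) (pvBfsRun oe t0)
          ↔ ∀ t ∈ t0 :: ts, x ∈ pvSatRun oe t := by
        intro x
        rw [List.foldl_map, pvInterFold_mem (fun t => pvBfsRun oe t) ts (pvBfsRun oe t0) x]
        constructor
        · rintro ⟨ha, hb⟩ t ht
          rcases List.mem_cons.1 ht with rfl | ht'
          · exact (pvSatRun_mem oe t x).2 ((pvBfsRun_mem oe t x).1 ha)
          · exact (pvSatRun_mem oe t x).2 ((pvBfsRun_mem oe t x).1 (hb t ht'))
        · intro hall
          exact ⟨(pvBfsRun_mem oe t0 x).2 ((pvSatRun_mem oe t0 x).1 (hall t0 List.mem_cons_self)),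
            fun t ht => (pvBfsRun_mem oe t x).2
              ((pvSatRun_mem oe t x).1 (hall t (List.mem_cons_of_mem _ ht)))⟩
      have h2 := fun x => pvFull_mem oe (t0 :: ts) (by simp) x
      rw [← hts] at h1 h2 ⊢
      rw [pvMin_eq_of_mem_iff _ _ _ (fun x => (h1 x).trans (h2 x).symm)]

-- A's span loop is a flatMap of optional spans
theorem pvSpansA_eq (cols : List (String × Int)) (oe : List (String × List (String × String)))
    (acts : List (String × List (String × String))) :
    pvSpansA cols oe acts
      = (((cols.map (·.1)).filter
            (fun n => (PySem.Dict.mk ((PySem.Dict.mk acts).getD n [])).get? "activityType"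
              == some "BRANCH")).flatMap (pvSpanOptA cols oe)) := by
  unfold pvSpansA
  rw [← List.nil_append (((cols.map (·.1)).filter _).flatMap (pvSpanOptA cols oe)),
    ← PySem.List.foldl_append_eq_flatMap]
  apply PySem.List.foldl_congr_mem
  intro acc bn _
  unfold pvSpanOptA
  dsimp only
  split
  · simp
  · split
    · simp
    · split <;> simp

-- prefix sums of the difference array
def pvPrefix (d : List Int) (j : Nat) : Int :=
  ((List.range j).map (fun i => d.getD i 0)).sum

theorem pvPrefix_succ (d : List Int) (j : Nat) :
    pvPrefix d (j + 1) = pvPrefix d j + d.getD j 0 := by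
  unfold pvPrefix
  rw [List.range_succ, List.map_append, List.sum_append]
  simp

theorem pvPrefix_set (d : List Int) (i : Nat) (hi : i < d.length) (δ : Int) (j : Nat) :
    pvPrefix (d.set i (d.getD i 0 + δ)) j = pvPrefix d j + (if i < j then δ else 0) := by
  induction j with
  | zero => simp [pvPrefix]
  | succ j ih =>
    rw [pvPrefix_succ, pvPrefix_succ, ih]
    by_cases hj : j = i
    · subst hj
      have h1 : (d.set j (d.getD j 0 + δ)).getD j 0 = d.getD j 0 + δ := by
        simp [List.getD_eq_getElem?_getD, List.getElem?_set_self (by omega)]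
      rw [h1]
      have : ¬ j < j := lt_irrefl j
      simp only [this, if_false, Nat.lt_succ_iff, le_refl, if_true]
      ring
    · have h1 : (d.set i (d.getD i 0 + δ)).getD j 0 = d.getD j 0 := by
        simp [List.getD_eq_getElem?_getD, List.getElem?_set_ne (fun a => hj (a.symm))]
      rw [h1]
      by_cases hij : i < j
      · have : i < j + 1 := by omega
        simp only [hij, this, if_true]
        ring
      · have : ¬ i < j + 1 := by omega
        simp only [hij, this, if_false]
        ring

theorem pvPrefix_replicate (n j : Nat) : pvPrefix (List.replicate n (0 : Int)) j = 0 := by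
  unfold pvPrefix
  apply List.sum_eq_zero
  intro x hx
  obtain ⟨i, _, rfl⟩ := List.mem_map.1 hx
  rw [List.getD_eq_getElem?_getD]
  cases h : (List.replicate n (0 : Int))[i]? with
  | none => rfl
  | some v =>
    have := List.getElem?_replicate.symm.trans h
    split at this
    · simpa using this.symm
    · simp at this

theorem pvApplySpan_length (tc : Int) (d : List Int) (bm : Int × Int) :
    (pvApplySpan tc d bm).length = d.length := by
  unfold pvApplySpan
  dsimp only
  split <;> simp

theorem pvPrefix_applySpan (tc : Int) (d : List Int) (bm : Int × Int) (c : Int)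
    (hd : d.length = (tc + 1).toNat) (hc0 : 0 ≤ c) (hct : c < tc) :
    pvPrefix (pvApplySpan tc d bm) (c.toNat + 1)
      = pvPrefix d (c.toNat + 1) + (if bm.1 ≤ c ∧ c < bm.2 then 1 else 0) := by
  unfold pvApplySpan
  by_cases hlh : max bm.1 0 < min bm.2 tc
  · simp only [hlh, if_true]
    have hlo : (max bm.1 0).toNat < d.length := by omega
    have hhilen : (min bm.2 tc).toNat < d.length := by omega
    set d1 := d.set (max bm.1 0).toNat (d.getD (max bm.1 0).toNat 0 + 1) with hd1
    have hhilen1 : (min bm.2 tc).toNat < d1.length := by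
      rw [hd1, List.length_set]; exact hhilen
    have e2 : d1.set (min bm.2 tc).toNat (d1.getD (min bm.2 tc).toNat 0 - 1)
        = d1.set (min bm.2 tc).toNat (d1.getD (min bm.2 tc).toNat 0 + (-1)) := by
      ring_nf
    rw [e2, pvPrefix_set d1 _ hhilen1 (-1), hd1, pvPrefix_set d _ hlo 1]
    have e3 : ((max bm.1 0).toNat < c.toNat + 1) ↔ bm.1 ≤ c := by omega
    have e4 : ((min bm.2 tc).toNat < c.toNat + 1) ↔ bm.2 ≤ c := by omega
    simp only [e3, e4]
    split_ifs <;> omega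
  · simp only [hlh, if_false]
    have : ¬ (bm.1 ≤ c ∧ c < bm.2) := by omega
    simp [this]

theorem pvPrefix_foldl (tc : Int) (spans : List (Int × Int)) (d : List Int) (c : Int)
    (hd : d.length = (tc + 1).toNat) (hc0 : 0 ≤ c) (hct : c < tc) :
    pvPrefix (spans.foldl (pvApplySpan tc) d) (c.toNat + 1)
      = pvPrefix d (c.toNat + 1)
        + ((spans.filter (fun bm => decide (bm.1 ≤ c ∧ c < bm.2))).length : Int) := by
  induction spans generalizing d with
  | nil => simp
  | cons bm rest ih =>
    rw [List.foldl_cons, ih _ (by rw [pvApplySpan_length]; exact hd),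
      pvPrefix_applySpan tc d bm c hd hc0 hct, List.filter_cons]
    simp only [decide_eq_true_eq]
    split_ifs
    · simp only [List.length_cons]
      push_cast
      ring
    · simp

-- B's sweep collects exactly the zero-prefix columns
theorem pvSweep_eq (diff : List Int) (tc : Int) (a : Int) (ha0 : 0 ≤ a) (hat : a ≤ tc)
    (s : PySem.Set Int) (v : Int) (hv : v = pvPrefix diff a.toNat)
    (hs : ∀ x ∈ s, x < a) :
    ((PySem.List.pyRange a tc 1).foldl (fun (st : PySem.Set Int × Int) c =>
        let cover := st.2 + diff.getD c.toNat 0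
        (if cover == 0 then PySem.Set.add st.1 c else st.1, cover)) (s, v)).1
      = s ++ (PySem.List.pyRange a tc 1).filter
          (fun c => decide (pvPrefix diff (c.toNat + 1) = 0)) := by
  by_cases h : a < tc
  · rw [PySem.List.pyRange_one_cons h, List.foldl_cons, List.filter_cons]
    have hcov : v + diff.getD a.toNat 0 = pvPrefix diff (a.toNat + 1) := by
      rw [hv, pvPrefix_succ]
    have hrec := pvSweep_eq diff tc (a + 1) (by omega) (by omega)
    by_cases hz : pvPrefix diff (a.toNat + 1) = 0
    · have hb : ((v + diff.getD a.toNat 0) == 0) = true := by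
        rw [hcov]; simpa using hz
      simp only [hb, if_pos, hz, decide_true]
      rw [PySem.Set.add_of_not_mem (fun hmem => lt_irrefl a (hs a hmem))]
      rw [hrec (s ++ [a]) (v + diff.getD a.toNat 0)
        (by rw [hcov]; congr 1; omega)
        (by intro x hx
            rcases List.mem_append.1 hx with h' | h'
            · exact lt_trans (hs x h') (by omega)
            · simp at h'; omega)]
      simp
    · have hb : ((v + diff.getD a.toNat 0) == 0) = false := by
        rw [hcov]; simpa using hz
      simp only [hb, Bool.false_eq_true, if_false, hz, decide_false]
      rw [hrec s (v + diff.getD a.toNat 0)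
        (by rw [hcov]; congr 1; omega)
        (fun x hx => lt_trans (hs x hx) (by omega))]
  · rw [PySem.List.pyRange_one_eq_nil (by omega)]
    simp
termination_by (tc - a).toNat
decreasing_by omega

-- conditionally adding the elements of a duplicate-free list to a disjoint set is filtering
theorem pvAddFold_eq_filter (L : List Int) (hL : L.Nodup) (p : Int → Bool) (s : PySem.Set Int)
    (hdisj : ∀ x ∈ L, x ∉ s) :
    L.foldl (fun acc c => if p c then PySem.Set.add acc c else acc) s = s ++ L.filter p := by
  induction L generalizing s with
  | nil => simp
  | cons a t ih =>
    have hat : a ∉ t := (List.nodup_cons.1 hL).1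
    have htn : t.Nodup := (List.nodup_cons.1 hL).2
    rw [List.foldl_cons]
    cases hp : p a with
    | false =>
      rw [if_neg (by simp)]
      rw [ih htn s (fun x hx => hdisj x (List.mem_cons_of_mem _ hx))]
      simp [hp]
    | true =>
      rw [if_pos (by simp)]
      rw [PySem.Set.add_of_not_mem (hdisj a List.mem_cons_self)]
      rw [ih htn (s ++ [a]) (fun x hx => by
        intro hmem
        rcases List.mem_append.1 hmem with h1 | h1
        · exact hdisj x (List.mem_cons_of_mem _ hx) h1
        · have hxa : x = a := by simpa using h1
          exact hat (hxa ▸ hx))]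
      simp [hp]

-- B's difference array is the span list of A folded through pvApplySpan
theorem pvDiff_eq (cols : List (String × Int)) (oe : List (String × List (String × String)))
    (acts : List (String × List (String × String))) (tc : Int) (d0 : List Int) :
    (cols.foldl (fun (d : List Int) bnp =>
      if (PySem.Dict.mk ((PySem.Dict.mk acts).getD bnp.1 [])).get? "activityType" ≠ some "BRANCH" then d
      else
        let targets := (((PySem.Dict.mk oe).getD bnp.1 []).filter (fun p => p.2 == "BRANCH")).map (·.1)
        if targets.length < 2 then d
        else
          let hits := targets.foldl (fun (h : PySem.Dict String Int) t =>
              (pvSatRun oe t).foldl (fun h n => h.insert n (h.getD n 0 + 1)) h) PySem.Dict.empty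
          let full := (hits.items.filter (fun p => p.2 == (targets.length : Int))).map (·.1)
          match PySem.List.min? (full.map (fun n => (PySem.Dict.mk cols).getD n 0)) (fun x => x) with
          | none => d
          | some m => pvApplySpan tc d ((PySem.Dict.mk cols).getD bnp.1 0, m)) d0)
    = (pvSpansA cols oe acts).foldl (pvApplySpan tc) d0 := by
  rw [pvSpansA_eq]
  rw [List.foldl_flatMap]
  rw [List.filter_map, List.foldl_map]
  simp only [ne_eq, ite_not]
  rw [PySem.List.foldl_ite_eq_foldl_filter
    (fun bnp : String × Int =>
      (PySem.Dict.mk ((PySem.Dict.mk acts).getD bnp.1 [])).get? "activityType" = some "BRANCH")]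
  have hf : cols.filter ((fun n => (PySem.Dict.mk ((PySem.Dict.mk acts).getD n [])).get? "activityType" == some "BRANCH") ∘ (fun x : String × Int => x.1))
      = cols.filter (fun bnp => decide ((PySem.Dict.mk ((PySem.Dict.mk acts).getD bnp.1 [])).get? "activityType" = some "BRANCH")) := by
    apply List.filter_congr
    intro x _
    rw [Function.comp_apply, Bool.eq_iff_iff]
    simp
  rw [hf]
  apply PySem.List.foldl_congr_mem
  intro acc x _
  rw [pvSpanOpt_eq]
  unfold pvSpanOptB
  dsimp only
  split
  · simp
  · split <;> simp

-- ===== VERDICT (by name: the statement is the Claim_ definition above) =====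
theorem find_safe_columns_spec : Claim_equal_find_safe_columns := by
  intro cols oe acts tc _ _
  unfold Spec_find_safe_columns find_safe_columns find_safe_columns_alt
  by_cases htc : tc ≤ 0
  · rw [PySem.List.pyRange_one_eq_nil htc]
    simp
  · replace htc : 0 < tc := by omega
    dsimp only
    rw [pvDiff_eq cols oe acts tc]
    set spans := pvSpansA cols oe acts with hspans
    set d0 : List Int := List.replicate (if tc ≥ 0 then (tc + 1).toNat else 0) 0 with hd0
    have hd0len : d0.length = (tc + 1).toNat := by
      rw [hd0, List.length_replicate, if_pos (by omega)]
    set diff := spans.foldl (pvApplySpan tc) d0 with hdiff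
    have hpref : ∀ c : Int, 0 ≤ c → c < tc →
        pvPrefix diff (c.toNat + 1)
          = ((spans.filter (fun bm => decide (bm.1 ≤ c ∧ c < bm.2))).length : Int) := by
      intro c hc0 hct
      rw [hdiff, pvPrefix_foldl tc spans d0 c hd0len hc0 hct, hd0, pvPrefix_replicate]
      simp
    rw [pvSweep_eq diff tc 0 le_rfl (by omega) [] 0
      (by simp [pvPrefix]) (by simp)]
    rw [pvAddFold_eq_filter _ (PySem.List.nodup_pyRange_one 0 tc) _ [] (by simp)]
    rw [List.nil_append, List.nil_append]
    apply List.filter_congr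
    intro c hc
    have hcb : (0 : Int) ≤ c ∧ c < tc := PySem.List.mem_pyRange_one.1 hc
    rw [hpref c hcb.1 hcb.2]
    rw [Bool.eq_iff_iff]
    simp only [Bool.not_eq_eq_eq_not, Bool.not_true, List.any_eq_false, decide_eq_true_eq,
      Nat.cast_eq_zero, List.length_eq_zero_iff, List.filter_eq_nil_iff]
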